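-- pv_equiv track=rewrite | github.com/Ashauntis/4Jacks | scenes/gameboard.py | score_diagonal2
-- ===== SOURCE A (Python) =====
-- def score_diagonal2(row, col, board):
--     # starting top right and going to bottom left
--     score = 1
--
--     base_color = board[row][col]
--     streak_plus = True
--     streak_minus = True
--
--     for n in range(1, 7):
--         if row + n < 6 and col - n >= 0 and streak_plus:
--             if board[row + n][col - n] == base_color:
--                 score += 1
--             else:
--                 streak_plus = False
--
--         if row - n >= 0 and col + n < 7 and streak_minus:
--             if board[row - n][col + n] == base_color:
--                 score += 1
--             else:
--                 streak_minus = False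
--
--     return score
-- ===== SOURCE B (Python) =====
-- def score_diagonal2(row, col, board):
--     # Materialize the reachable anti-diagonal segment through (row, col) using
--     # closed-form direction limits, then score = gap between the nearest
--     # mismatched cells around the center (no directional walking, no flags).
--     base = board[row][col]
--     p = max(0, min(6, 5 - row, col))      # cells available toward bottom-left
--     m = max(0, min(6, row, 6 - col))      # cells available toward top-right
--     cells = [board[row + t][col - t] for t in range(-m, p + 1)]
--     bad = [j for j, v in enumerate(cells) if v != base]
--     lo = max([j for j in bad if j < m] + [-1])
--     hi = min([j for j in bad if j > m] + [len(cells)])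
--     return hi - lo - 1
-- ===== Notes on version B (the rewrite author's own statement) =====
-- stated objective: alternative
-- what changed: Instead of A's fixed range(1,7) loop that interleaves both diagonal directions with two streak flags, B computes closed-form direction limits, materializes the reachable anti-diagonal segment once, lists the positions of mismatched cells, and returns the gap between the nearest mismatches around the centre.
-- outside the precondition, e.g. on score_diagonal2(0, 2, [[5, 5, 5], [7, 9], []]): A returns 1, B raises IndexError
import Mathlib
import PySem

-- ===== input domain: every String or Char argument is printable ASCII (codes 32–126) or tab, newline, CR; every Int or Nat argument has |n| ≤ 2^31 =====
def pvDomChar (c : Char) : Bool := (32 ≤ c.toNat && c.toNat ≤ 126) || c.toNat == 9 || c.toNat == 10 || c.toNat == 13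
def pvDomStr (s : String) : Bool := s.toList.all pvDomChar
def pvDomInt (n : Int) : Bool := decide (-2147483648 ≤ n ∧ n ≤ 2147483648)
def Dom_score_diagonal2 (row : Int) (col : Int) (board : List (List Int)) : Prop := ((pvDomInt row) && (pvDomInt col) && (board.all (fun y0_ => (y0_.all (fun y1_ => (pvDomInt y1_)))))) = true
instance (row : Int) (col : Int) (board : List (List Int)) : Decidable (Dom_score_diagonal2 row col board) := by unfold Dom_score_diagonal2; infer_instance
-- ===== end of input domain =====

-- B replaces A's interleaved flagged scan by closed-form direction limits, one
-- materialized diagonal segment, and the gap between the nearest mismatched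
-- cells around the centre (objective: alternative algorithm, same cost).

-- board[i][j]; under Pre_ every access performed is in Python range, so the getD defaults never fire
-- (Python raises IndexError exactly where pyGet? is none; those inputs are outside Pre_).
def pvCell (board : List (List Int)) (i j : Int) : Int :=
  (PySem.List.pyGet? ((PySem.List.pyGet? board i).getD []) j).getD 0

-- ===== PORT A =====
-- one iteration of A's for-loop body: state = (score, streak_plus, streak_minus)
def pvStepA (row col : Int) (board : List (List Int)) (base : Int)
    (s : Int × Bool × Bool) (n : Int) : Int × Bool × Bool :=
  let s1 :=
    if row + n < 6 ∧ 0 ≤ col - n ∧ s.2.1 = true then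
      (if pvCell board (row + n) (col - n) = base then (s.1 + 1, s.2.1, s.2.2)
       else (s.1, false, s.2.2))
    else s
  if 0 ≤ row - n ∧ col + n < 7 ∧ s1.2.2 = true then
    (if pvCell board (row - n) (col + n) = base then (s1.1 + 1, s1.2.1, s1.2.2)
     else (s1.1, s1.2.1, false))
  else s1

def score_diagonal2 (row : Int) (col : Int) (board : List (List Int)) : Int :=
  let base := pvCell board row col
  ((PySem.List.pyRange 1 7 1).foldl (pvStepA row col board base) (1, true, true)).1

-- ===== PORT B =====
-- [j for j, v in enumerate(cells) if v != base]
def pvBad (base : Int) (s : Int) (cells : List Int) : List Int :=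
  ((PySem.List.enumerate cells s).filter (fun jv => jv.2 != base)).map (fun jv => jv.1)

def score_diagonal2_alt (row : Int) (col : Int) (board : List (List Int)) : Int :=
  let base := pvCell board row col
  let p : Int := max 0 (min 6 (min (5 - row) col))
  let m : Int := max 0 (min 6 (min row (6 - col)))
  let cells : List Int := (PySem.List.pyRange (-m) (p + 1) 1).map (fun t => pvCell board (row + t) (col - t))
  let bad : List Int := pvBad base 0 cells
  let lo : Int := (PySem.List.max? ((bad.filter (fun j => j < m)) ++ [-1]) (fun y => y)).getD 0
  let hi : Int := (PySem.List.min? ((bad.filter (fun j => m < j)) ++ [(cells.length : Int)]) (fun y => y)).getD 0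
  hi - lo - 1

-- ===== PRECONDITION & SPEC =====
-- Pre_ excludes the inputs where A raises IndexError (the start cell or a guarded diagonal
-- access out of Python range); it also excludes inputs where a guarded diagonal access is out
-- of range but A happens to return because an earlier colour mismatch cleared the streak flag
-- first — an artefact of A's evaluation order.
def Pre_score_diagonal2 (row : Int) (col : Int) (board : List (List Int)) : Prop :=
  PySem.Raise.InRange board.length row ∧
  PySem.Raise.InRange ((PySem.List.pyGet? board row).getD []).length col ∧
  ∀ n ∈ PySem.List.pyRange 1 7 1,
    ((row + n < 6 ∧ 0 ≤ col - n) →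
        PySem.Raise.InRange board.length (row + n) ∧
        PySem.Raise.InRange ((PySem.List.pyGet? board (row + n)).getD []).length (col - n)) ∧
    ((0 ≤ row - n ∧ col + n < 7) →
        PySem.Raise.InRange board.length (row - n) ∧
        PySem.Raise.InRange ((PySem.List.pyGet? board (row - n)).getD []).length (col + n))
instance (row : Int) (col : Int) (board : List (List Int)) : Decidable (Pre_score_diagonal2 row col board) := by unfold Pre_score_diagonal2; infer_instance

def pvWitness_score_diagonal2 : Int × Int × List (List Int) :=
  (2, 3, [[0,0,0,0,0,0,0],[0,1,0,0,0,0,0],[0,0,1,0,0,0,0],[0,0,0,1,0,0,0],[0,0,0,0,0,0,0],[0,0,0,0,0,0,0]])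

def Spec_score_diagonal2 (row : Int) (col : Int) (board : List (List Int)) (out : Int) : Prop := out = score_diagonal2_alt row col board
instance (row : Int) (col : Int) (board : List (List Int)) (out : Int) : Decidable (Spec_score_diagonal2 row col board out) := by unfold Spec_score_diagonal2; infer_instance

-- ===== CLAIM (what is proved, stated in full; the proofs are below) =====
def Claim_equal_score_diagonal2 : Prop := ∀ (row : Int) (col : Int) (board : List (List Int)), Dom_score_diagonal2 row col board → Pre_score_diagonal2 row col board → Spec_score_diagonal2 row col board (score_diagonal2 row col board)

-- ===== LEMMAS AND PROOFS =====

-- A's plus-direction contribution to the score when scanning the list ns with streak flag sp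
def pvCp (row col : Int) (board : List (List Int)) (base : Int) : List Int → Bool → Int
  | [], _ => 0
  | n :: ns, sp =>
    if row + n < 6 ∧ 0 ≤ col - n ∧ sp = true then
      (if pvCell board (row + n) (col - n) = base then 1 + pvCp row col board base ns sp
       else pvCp row col board base ns false)
    else pvCp row col board base ns sp

-- A's minus-direction contribution
def pvCm (row col : Int) (board : List (List Int)) (base : Int) : List Int → Bool → Int
  | [], _ => 0
  | n :: ns, sm =>
    if 0 ≤ row - n ∧ col + n < 7 ∧ sm = true then
      (if pvCell board (row - n) (col + n) = base then 1 + pvCm row col board base ns sm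
       else pvCm row col board base ns false)
    else pvCm row col board base ns sm

theorem pvCp_false (row col : Int) (board : List (List Int)) (base : Int) (ns : List Int) :
    pvCp row col board base ns false = 0 := by
  induction ns with
  | nil => rfl
  | cons n ns ih => simp [pvCp, ih]

theorem pvCm_false (row col : Int) (board : List (List Int)) (base : Int) (ns : List Int) :
    pvCm row col board base ns false = 0 := by
  induction ns with
  | nil => rfl
  | cons n ns ih => simp [pvCm, ih]

-- the two directions of A's fold are independent: the score splits into the two contributions
theorem pvFold_split (row col : Int) (board : List (List Int)) (base : Int)
    (ns : List Int) (score : Int) (sp sm : Bool) :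
    ((ns.foldl (pvStepA row col board base) (score, sp, sm)).1)
      = score + pvCp row col board base ns sp + pvCm row col board base ns sm := by
  induction ns generalizing score sp sm with
  | nil => simp [pvCp, pvCm]
  | cons n ns ih =>
    cases sp <;> cases sm <;>
      simp only [List.foldl_cons, pvStepA, pvCp, pvCm] <;>
      split_ifs <;> simp_all
    all_goals omega

-- once the plus direction leaves the board it never re-enters: later steps contribute 0
theorem pvCp_dead (row col : Int) (board : List (List Int)) (base : Int) (L : List Int)
    (hmono : ∀ m ∈ L, ¬ (row + m < 6 ∧ 0 ≤ col - m)) :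
    pvCp row col board base L true = 0 := by
  induction L with
  | nil => rfl
  | cons a L ihL =>
    simp only [pvCp]
    rw [if_neg (fun h => hmono a (by simp) ⟨h.1, h.2.1⟩)]
    exact ihL (fun m hm => hmono m (by simp [hm]))

theorem pvCm_dead (row col : Int) (board : List (List Int)) (base : Int) (L : List Int)
    (hmono : ∀ m ∈ L, ¬ (0 ≤ row - m ∧ col + m < 7)) :
    pvCm row col board base L true = 0 := by
  induction L with
  | nil => rfl
  | cons a L ihL =>
    simp only [pvCm]
    rw [if_neg (fun h => hmono a (by simp) ⟨h.1, h.2.1⟩)]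
    exact ihL (fun m hm => hmono m (by simp [hm]))

-- A's plus-direction flagged scan over [n, 7) is the matching prefix of B's plus cells
theorem pvCp_eq_run (row col : Int) (board : List (List Int)) (base : Int) (fuel : Nat) (n : Int)
    (h : n + fuel = 7) (hn : 1 ≤ n) :
    pvCp row col board base (PySem.List.pyRange n 7 1) true
      = ((((PySem.List.pyRange n (max 0 (min 6 (min (5 - row) col)) + 1) 1).map
            (fun t => pvCell board (row + t) (col - t))).takeWhile (· == base)).length : Int) := by
  induction fuel generalizing n with
  | zero =>
    rw [PySem.List.pyRange_one_eq_nil (by omega),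
        PySem.List.pyRange_one_eq_nil (by omega)]
    rfl
  | succ fuel ih =>
    by_cases hb : row + n < 6 ∧ 0 ≤ col - n
    · have hnp : n < max 0 (min 6 (min (5 - row) col)) + 1 := by omega
      rw [PySem.List.pyRange_one_cons (by omega), PySem.List.pyRange_one_cons hnp]
      simp only [pvCp, List.map_cons]
      rw [if_pos (by exact ⟨hb.1, hb.2, by simp⟩)]
      by_cases hm : pvCell board (row + n) (col - n) = base
      · rw [if_pos hm, List.takeWhile_cons_of_pos (by simp [hm]),
            ih (n + 1) (by omega) (by omega), List.length_cons]
        push_cast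
        omega
      · rw [if_neg hm, List.takeWhile_cons_of_neg (by simp [hm]), pvCp_false]
        rfl
    · rw [PySem.List.pyRange_one_eq_nil (show max 0 (min 6 (min (5 - row) col)) + 1 ≤ n by omega)]
      rw [pvCp_dead row col board base _ (by
        intro m hm
        rw [PySem.List.mem_pyRange_one] at hm
        omega)]
      rfl

-- A's minus-direction flagged scan over [n, 7) is the matching prefix of B's minus cells
theorem pvCm_eq_run (row col : Int) (board : List (List Int)) (base : Int) (fuel : Nat) (n : Int)
    (h : n + fuel = 7) (hn : 1 ≤ n) :
    pvCm row col board base (PySem.List.pyRange n 7 1) true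
      = ((((PySem.List.pyRange n (max 0 (min 6 (min row (6 - col))) + 1) 1).map
            (fun t => pvCell board (row - t) (col + t))).takeWhile (· == base)).length : Int) := by
  induction fuel generalizing n with
  | zero =>
    rw [PySem.List.pyRange_one_eq_nil (by omega),
        PySem.List.pyRange_one_eq_nil (by omega)]
    rfl
  | succ fuel ih =>
    by_cases hb : 0 ≤ row - n ∧ col + n < 7
    · have hnp : n < max 0 (min 6 (min row (6 - col))) + 1 := by omega
      rw [PySem.List.pyRange_one_cons (by omega), PySem.List.pyRange_one_cons hnp]
      simp only [pvCm, List.map_cons]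
      rw [if_pos (by exact ⟨hb.1, hb.2, by simp⟩)]
      by_cases hm : pvCell board (row - n) (col + n) = base
      · rw [if_pos hm, List.takeWhile_cons_of_pos (by simp [hm]),
            ih (n + 1) (by omega) (by omega), List.length_cons]
        push_cast
        omega
      · rw [if_neg hm, List.takeWhile_cons_of_neg (by simp [hm]), pvCm_false]
        rfl
    · rw [PySem.List.pyRange_one_eq_nil (show max 0 (min 6 (min row (6 - col))) + 1 ≤ n by omega)]
      rw [pvCm_dead row col board base _ (by
        intro m hm
        rw [PySem.List.mem_pyRange_one] at hm
        omega)]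
      rfl

theorem pvBad_nil (base s : Int) : pvBad base s [] = [] := rfl

theorem pvBad_cons (base s a : Int) (L : List Int) :
    pvBad base s (a :: L)
      = (if a = base then [] else [s]) ++ pvBad base (s + 1) L := by
  by_cases h : a = base <;>
    simp [pvBad, PySem.List.enumerate_cons, h]

theorem pvBad_append (base s : Int) (X Y : List Int) :
    pvBad base s (X ++ Y) = pvBad base s X ++ pvBad base (s + X.length) Y := by
  simp [pvBad, PySem.List.enumerate_append, List.filter_append]

theorem pvBad_mem (base s : Int) (L : List Int) (x : Int) (hx : x ∈ pvBad base s L) :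
    s ≤ x ∧ x < s + L.length := by
  simp only [pvBad, List.mem_map, List.mem_filter] at hx
  obtain ⟨jv, ⟨hmem, -⟩, rfl⟩ := hx
  rw [PySem.List.mem_enumerate_iff] at hmem
  obtain ⟨k, hk, rfl⟩ := hmem
  refine ⟨by simp, ?_⟩
  simp
  omega

-- Python's min/max of 'list + [sentinel]' is the running fold seeded with the sentinel
theorem pvMax_append (l : List Int) (c : Int) :
    PySem.List.max? (l ++ [c]) (fun y => y) = some (l.foldl max c) := by
  cases l with
  | nil => simp [PySem.List.max?_id_cons]
  | cons b bs =>
    rw [List.cons_append, PySem.List.max?_id_cons, List.foldl_append]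
    simp only [List.foldl_cons, List.foldl_nil]
    have h1 : max (List.foldl max b bs) c = List.foldl max (max c b) bs := by
      rw [List.foldl_assoc, max_comm]
    rw [h1]

theorem pvMin_append (l : List Int) (c : Int) :
    PySem.List.min? (l ++ [c]) (fun y => y) = some (l.foldl min c) := by
  cases l with
  | nil => simp [PySem.List.min?_id_cons]
  | cons b bs =>
    rw [List.cons_append, PySem.List.min?_id_cons, List.foldl_append]
    simp only [List.foldl_cons, List.foldl_nil]
    have h1 : min (List.foldl min b bs) c = List.foldl min (min c b) bs := by
      rw [List.foldl_assoc, min_comm]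
    rw [h1]

-- the last mismatch position below the centre (sentinel s-1), by reverse induction
theorem pvLoAux (base s : Int) (L : List Int) :
    (pvBad base s L).foldl max (s - 1)
      = s + L.length - 1 - ((L.reverse.takeWhile (· == base)).length : Int) := by
  induction L using List.reverseRecOn with
  | nil => simp [pvBad_nil]
  | append_singleton L a ih =>
    rw [pvBad_append, List.foldl_append, ih, pvBad_cons]
    have hrev : (L ++ [a]).reverse = a :: L.reverse := by simp
    by_cases h : a = base
    · rw [if_pos h, hrev, List.takeWhile_cons_of_pos (by simp [h])]
      simp only [List.nil_append, pvBad_nil, List.foldl_nil, List.length_append,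
        List.length_cons, List.length_nil]
      push_cast
      ring
    · rw [if_neg h, hrev, List.takeWhile_cons_of_neg (by simp [h])]
      have htw : (L.reverse.takeWhile (· == base)).length ≤ L.length := by
        have := (List.takeWhile_sublist (l := L.reverse) (p := (· == base))).length_le
        simpa using this
      simp only [List.cons_append, List.nil_append, pvBad_nil, List.foldl_cons,
        List.foldl_nil, List.length_append, List.length_cons, List.length_nil]
      push_cast
      omega

theorem pvFoldMin_ge (l : List Int) (a : Int) (h : ∀ x ∈ l, a ≤ x) : l.foldl min a = a := by
  induction l with
  | nil => rfl
  | cons b bs ih =>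
    simp only [List.foldl_cons]
    rw [min_eq_left (h b (by simp))]
    exact ih (fun x hx => h x (by simp [hx]))

-- the first mismatch position above the centre (sentinel s + len), by forward induction
theorem pvHiAux (base s : Int) (R : List Int) :
    (pvBad base s R).foldl min (s + R.length)
      = s + ((R.takeWhile (· == base)).length : Int) := by
  induction R generalizing s with
  | nil => simp [pvBad_nil]
  | cons a R ih =>
    rw [pvBad_cons]
    by_cases h : a = base
    · rw [if_pos h, List.nil_append, List.takeWhile_cons_of_pos (by simp [h])]
      have hih := ih (s + 1)
      simp only [List.length_cons]
      push_cast
      push_cast at hih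
      rw [show s + (↑R.length + 1) = s + 1 + ↑R.length by ring, hih]
      ring
    · rw [if_neg h, List.cons_append, List.nil_append, List.foldl_cons,
          List.takeWhile_cons_of_neg (by simp [h])]
      rw [min_eq_right (by simp only [List.length_cons]; push_cast; omega)]
      rw [pvFoldMin_ge _ _ (fun x hx => by
        have := pvBad_mem base (s + 1) R x hx
        omega)]
      simp

-- range(-m, 0) read backwards is the negation of range(1, m+1)
theorem pvRevRange (m : Int) (hm : 0 ≤ m) :
    PySem.List.pyRange (-m) 0 1 = ((PySem.List.pyRange 1 (m + 1) 1).map (fun x => -x)).reverse := by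
  obtain ⟨k, rfl⟩ := Int.eq_ofNat_of_zero_le hm
  clear hm
  induction k with
  | zero => simp [PySem.List.pyRange_one_eq_nil]
  | succ k ih =>
    have h1 : PySem.List.pyRange (-((k : Int) + 1)) 0 1
        = (-((k : Int) + 1)) :: PySem.List.pyRange (-(k : Int)) 0 1 := by
      rw [PySem.List.pyRange_one_cons (by omega)]
      norm_num
    have h2 : PySem.List.pyRange 1 (((k : Int) + 1) + 1) 1
        = PySem.List.pyRange 1 ((k : Int) + 1) 1 ++ [(k : Int) + 1] := by
      rw [PySem.List.pyRange_one_succ_right (by omega)]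
    push_cast
    rw [h1, h2, ih]
    simp

-- ===== VERDICT (by name: the statement is the Claim_ definition above) =====
theorem score_diagonal2_spec : Claim_equal_score_diagonal2 := by
  intro row col board _ _
  show score_diagonal2 row col board = score_diagonal2_alt row col board
  simp only [score_diagonal2, score_diagonal2_alt]
  rw [pvFold_split]
  rw [pvCp_eq_run row col board _ 6 1 (by norm_num) le_rfl,
      pvCm_eq_run row col board _ 6 1 (by norm_num) le_rfl]
  set base := pvCell board row col with hbase
  set p : Int := max 0 (min 6 (min (5 - row) col)) with hp
  set m : Int := max 0 (min 6 (min row (6 - col))) with hm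
  have hp0 : 0 ≤ p := le_max_left _ _
  have hm0 : 0 ≤ m := le_max_left _ _
  set f : Int → Int := fun t => pvCell board (row + t) (col - t) with hf
  set R : List Int := (PySem.List.pyRange 1 (p + 1) 1).map f with hR
  set L : List Int := (PySem.List.pyRange (-m) 0 1).map f with hL
  -- split the materialized diagonal around the centre cell
  have hsplit : (PySem.List.pyRange (-m) (p + 1) 1).map f = L ++ f 0 :: R := by
    rw [PySem.List.pyRange_one_append (-m) 0 (p + 1) (by omega) (by omega),
        PySem.List.pyRange_one_cons (show (0 : Int) < p + 1 by omega)]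
    simp [hL, hR]
  have hf0 : f 0 = base := by
    simp only [hf, hbase]
    norm_num
  have hLlen : (L.length : Int) = m := by
    simp only [hL, List.length_map, PySem.List.length_pyRange_one]
    omega
  -- the mismatch indices split into those below and those above the centre
  have hbad : pvBad base 0 ((PySem.List.pyRange (-m) (p + 1) 1).map f)
      = pvBad base 0 L ++ pvBad base (m + 1) R := by
    rw [hsplit, pvBad_append, pvBad_cons, if_pos hf0]
    rw [show (0 : Int) + (L.length : Int) = m by omega]
    simp
  have hfiltLT : (pvBad base 0 L ++ pvBad base (m + 1) R).filter (fun j => decide (j < m))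
      = pvBad base 0 L := by
    rw [List.filter_append,
        List.filter_eq_self.mpr (fun x hx => by
          have := pvBad_mem base 0 L x hx
          simp only [decide_eq_true_eq]
          omega),
        List.filter_eq_nil_iff.mpr (fun x hx => by
          have := pvBad_mem base (m + 1) R x hx
          simp only [decide_eq_true_eq]
          omega)]
    simp
  have hfiltGT : (pvBad base 0 L ++ pvBad base (m + 1) R).filter (fun j => decide (m < j))
      = pvBad base (m + 1) R := by
    rw [List.filter_append,
        List.filter_eq_nil_iff.mpr (fun x hx => by
          have := pvBad_mem base 0 L x hx
          simp only [decide_eq_true_eq]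
          omega),
        List.filter_eq_self.mpr (fun x hx => by
          have := pvBad_mem base (m + 1) R x hx
          simp only [decide_eq_true_eq]
          omega)]
    simp
  have hcl : ((((PySem.List.pyRange (-m) (p + 1) 1).map f).length : Nat) : Int)
      = (m + 1) + (R.length : Int) := by
    rw [hsplit]
    simp only [List.length_append, List.length_cons]
    push_cast
    omega
  -- L read backwards is exactly A's minus-direction cell list
  have hLrev : L.reverse
      = (PySem.List.pyRange 1 (m + 1) 1).map (fun t => pvCell board (row - t) (col + t)) := by
    rw [hL, pvRevRange m hm0, List.map_reverse, List.reverse_reverse, List.map_map]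
    refine List.map_congr_left (fun t _ => ?_)
    simp only [Function.comp, hf]
    rw [show row + -t = row - t by ring, show col - -t = col + t by ring]
  rw [hbad, hfiltLT, hfiltGT, pvMax_append, pvMin_append]
  simp only [Option.getD_some]
  rw [show (-1 : Int) = 0 - 1 by ring, pvLoAux base 0 L, hcl, pvHiAux base (m + 1) R, hLrev]
  rw [hLlen]
  ring
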